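-- pv_equiv track=rewrite | github.com/maxbogus/Data-Structures | week2_priority_queues_and_disjoint_sets/1_make_heap/build_heap.py | build_heap_fast
-- ===== SOURCE A (Python) =====
-- def build_heap_fast(data):
--     result = []
--     size = len(data)
--
--     def get_left(i):
--         return (2 * i) + 1
--
--     def get_right(i):
--         return (2 * i) + 2
--
--     def heapify_down(i):
--         left = get_left(i)
--         right = get_right(i)
--
--         smallest = i
--
--         if left < size and data[left] < data[i]:
--             smallest = left
--
--         if right < size and data[right] < data[smallest]:
--             smallest = right
--
--         if smallest != i:
--             result.append((smallest, i))
--             data[i], data[smallest] = data[smallest], data[i]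
--             heapify_down(smallest)
--
--     def buildHeap():
--         for i in range(size, -1, -1):
--             heapify_down(i)
--
--     buildHeap()
--
--     return result
-- ===== SOURCE B (Python) =====
-- def build_heap_fast(data):
--     # Iterative sift-down over internal nodes only, using a single min-child
--     # comparison instead of A's two guarded "smallest" updates.
--     # Mutates data in place with the same swap sequence as A.
--     size = len(data)
--     out = []
--     for start in reversed(range(size // 2)):
--         i = start
--         while 2 * i + 1 < size:
--             c = 2 * i + 1
--             if c + 1 < size and data[c + 1] < data[c]:
--                 c = c + 1
--             if data[c] < data[i]:
--                 out.append((c, i))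
--                 data[i], data[c] = data[c], data[i]
--                 i = c
--             else:
--                 break
--     return out
-- ===== Notes on version B (the rewrite author's own statement) =====
-- stated objective: faster
-- what changed: Replaces A's recursive heapify_down with its two guarded 'smallest' updates by an iterative sift-down whose loop condition is 'has a left child', which first picks the single min-child and then does one parent-vs-child comparison, and the top-level pass runs only over the internal nodes (range(size//2)) instead of range(size,-1,-1), skipping the ~n/2 no-op leaf calls.
import Mathlib
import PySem

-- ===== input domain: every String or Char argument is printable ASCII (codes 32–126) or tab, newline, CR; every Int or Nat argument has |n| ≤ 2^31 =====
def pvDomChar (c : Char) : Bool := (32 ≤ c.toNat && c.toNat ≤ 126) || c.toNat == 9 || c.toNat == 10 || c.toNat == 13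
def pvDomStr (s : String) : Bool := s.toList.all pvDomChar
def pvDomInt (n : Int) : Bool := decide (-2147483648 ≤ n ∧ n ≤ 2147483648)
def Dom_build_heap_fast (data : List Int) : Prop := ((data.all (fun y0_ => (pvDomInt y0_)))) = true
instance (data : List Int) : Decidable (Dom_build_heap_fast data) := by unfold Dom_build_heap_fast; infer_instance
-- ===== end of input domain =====

-- B replaces A's recursive heapify_down (two guarded `smallest` updates, recursion on every
-- index of range(size, -1, -1)) by an iterative sift-down over the internal nodes only, whose
-- while-condition is "has a left child" and whose body picks the min-child first and then makes
-- one parent-vs-child comparison; same return value. Both A and B mutate the Python argument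
-- list in place with the same swap sequence; the equivalence proved here is about the return value.

-- ===== PORT A =====
-- Python's "data[i], data[smallest] = data[smallest], data[i]" (RHS read first, then assigned)
def lswap (xs : List Int) (i j : Nat) : List Int :=
  (xs.set i (xs.getD j 0)).set j (xs.getD i 0)

-- A's two guarded comparisons choosing `smallest` (indices are checked `< size` before any
-- access, so getD with default 0 is exact)
def smallestA (size i : Nat) (data : List Int) : Nat :=
  let s1 := if 2 * i + 1 < size ∧ data.getD (2 * i + 1) 0 < data.getD i 0 then 2 * i + 1 else i
  if 2 * i + 2 < size ∧ data.getD (2 * i + 2) 0 < data.getD s1 0 then 2 * i + 2 else s1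

-- termination fact for the recursion below
theorem smallestA_bound (size i : Nat) (data : List Int) (h : smallestA size i data ≠ i) :
    i < smallestA size i data ∧ smallestA size i data < size := by
  simp only [smallestA] at *
  split_ifs at * <;> omega

-- A's recursive heapify_down; state = (data, result), result.append = ++ [·]
def heapifyDownA (size i : Nat) (data : List Int) (res : List (Int × Int)) :
    List Int × List (Int × Int) :=
  if _h : smallestA size i data ≠ i then
    heapifyDownA size (smallestA size i data) (lswap data i (smallestA size i data))
      (res ++ [((smallestA size i data : Int), (i : Int))])
  else (data, res)
termination_by size - i
decreasing_by
  have := smallestA_bound size i data _h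
  omega

-- buildHeap: for i in range(size, -1, -1) — the indices size, size-1, …, 0, all nonnegative,
-- so folding over (List.range (size+1)).reverse is exact.
def build_heap_fast (data : List Int) : List (Int × Int) :=
  (((List.range (data.length + 1)).reverse).foldl
    (fun st i => heapifyDownA data.length i st.1 st.2) (data, [])).2

-- ===== PORT B =====
-- "c = 2*i+1; if c+1 < size and data[c+1] < data[c]: c = c+1"
def minChildB (size i : Nat) (data : List Int) : Nat :=
  if 2 * i + 2 < size ∧ data.getD (2 * i + 2) 0 < data.getD (2 * i + 1) 0
  then 2 * i + 2 else 2 * i + 1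

-- B's swap: same Python statement, assignments transcribed child-slot first (i ≠ c there)
def cswap (xs : List Int) (i c : Nat) : List Int :=
  (xs.set c (xs.getD i 0)).set i (xs.getD c 0)

-- B's `while 2*i+1 < size` loop; loop state = (i, data, out)
def siftDownB (size i : Nat) (data : List Int) (out : List (Int × Int)) :
    List Int × List (Int × Int) :=
  if _h : 2 * i + 1 < size then
    let c := minChildB size i data
    if data.getD c 0 < data.getD i 0 then
      siftDownB size c (cswap data i c) (out ++ [((c : Int), (i : Int))])
    else (data, out)
  else (data, out)
termination_by size - i
decreasing_by
  simp only [minChildB] at *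
  split_ifs at * <;> omega

-- for start in reversed(range(size // 2)) — the internal nodes size/2 - 1, …, 0
def build_heap_fast_alt (data : List Int) : List (Int × Int) :=
  (((List.range (data.length / 2)).reverse).foldl
    (fun st i => siftDownB data.length i st.1 st.2) (data, [])).2

-- ===== PRECONDITION & SPEC =====
def Spec_build_heap_fast (data : List Int) (out : List (Int × Int)) : Prop := out = build_heap_fast_alt data
instance (data : List Int) (out : List (Int × Int)) : Decidable (Spec_build_heap_fast data out) := by unfold Spec_build_heap_fast; infer_instance

-- ===== CLAIM (what is proved, stated in full; the proofs are below) =====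
def Claim_equal_build_heap_fast : Prop := ∀ (data : List Int), Dom_build_heap_fast data → Spec_build_heap_fast data (build_heap_fast data)

-- ===== LEMMAS AND PROOFS =====

-- on a node with no left child, A's `smallest` is i
theorem smallestA_leaf (size i : Nat) (data : List Int) (h : ¬ 2 * i + 1 < size) :
    smallestA size i data = i := by
  simp only [smallestA]
  split_ifs <;> omega

-- on an internal node, A's `smallest` is B's min-child when it beats the parent, else i
theorem smallestA_char (size i : Nat) (data : List Int) (h : 2 * i + 1 < size) :
    smallestA size i data
      = (if data.getD (minChildB size i data) 0 < data.getD i 0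
         then minChildB size i data else i) := by
  simp only [smallestA, minChildB]
  split_ifs <;> first | rfl | omega

-- the two swap transcriptions agree on distinct indices
theorem lswap_eq_cswap (xs : List Int) (i c : Nat) (h : i ≠ c) :
    lswap xs i c = cswap xs i c := by
  simp only [lswap, cswap]
  exact List.set_comm _ _ h

-- the recursive and the iterative sift-down compute the same state transformation
theorem heapifyDownA_eq_siftDownB (n : Nat) :
    ∀ size i data res, size - i ≤ n →
      heapifyDownA size i data res = siftDownB size i data res := by
  induction n with
  | zero =>
      intro size i data res hn
      by_cases h : 2 * i + 1 < size
      · omega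
      · rw [heapifyDownA, siftDownB, dif_neg (not_not_intro (smallestA_leaf size i data h)),
          dif_neg h]
  | succ n ih =>
      intro size i data res hn
      by_cases h : 2 * i + 1 < size
      · have hchar := smallestA_char size i data h
        have hc : i < minChildB size i data ∧ minChildB size i data < size := by
          simp only [minChildB]
          split_ifs <;> omega
        by_cases hlt : data.getD (minChildB size i data) 0 < data.getD i 0
        · have hs : smallestA size i data = minChildB size i data := by
            rw [hchar, if_pos hlt]
          have hne : smallestA size i data ≠ i := by omega
          rw [heapifyDownA, siftDownB, dif_pos hne, dif_pos h]
          simp only [hs, if_pos hlt]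
          rw [lswap_eq_cswap data i (minChildB size i data) (by omega)]
          exact ih size _ _ _ (by omega)
        · have hs : smallestA size i data = i := by rw [hchar, if_neg hlt]
          rw [heapifyDownA, siftDownB, dif_neg (not_not_intro hs), dif_pos h]
          simp only [if_neg hlt]
      · rw [heapifyDownA, siftDownB, dif_neg (not_not_intro (smallestA_leaf size i data h)),
          dif_neg h]

-- a heapify_down call on an index with no left child is the identity on the state
theorem heapifyDownA_leaf (size i : Nat) (h : size ≤ 2 * i + 1)
    (data : List Int) (res : List (Int × Int)) :
    heapifyDownA size i data res = (data, res) := by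
  rw [heapifyDownA, dif_neg (not_not_intro (smallestA_leaf size i data (by omega)))]

-- A's pass over size, …, 0 collapses to the pass over size/2 - 1, …, 0
theorem fold_drop_leaves (size : Nat) :
    ∀ k, size / 2 ≤ k → ∀ st : List Int × List (Int × Int),
      ((List.range k).reverse).foldl (fun st i => heapifyDownA size i st.1 st.2) st
        = ((List.range (size / 2)).reverse).foldl (fun st i => heapifyDownA size i st.1 st.2) st := by
  intro k
  induction k with
  | zero =>
      intro hk st
      have h0 : size / 2 = 0 := by omega
      rw [h0]
  | succ n ih =>
      intro hk st
      rcases Nat.lt_or_ge (size / 2) (n + 1) with hlt | hge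
      · rw [List.range_succ, List.reverse_append]
        simp only [List.reverse_cons, List.reverse_nil, List.nil_append, List.singleton_append,
          List.foldl_cons]
        rw [heapifyDownA_leaf size n (by omega) st.1 st.2]
        exact ih (by omega) st
      · have h1 : size / 2 = n + 1 := by omega
        rw [h1]

-- ===== VERDICT (by name: the statement is the Claim_ definition above) =====
theorem build_heap_fast_spec : Claim_equal_build_heap_fast := by
  intro data _
  unfold Spec_build_heap_fast build_heap_fast build_heap_fast_alt
  rw [fold_drop_leaves data.length (data.length + 1) (by omega)]
  have hf : (fun (st : List Int × List (Int × Int)) (i : Nat) =>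
        heapifyDownA data.length i st.1 st.2)
      = (fun st i => siftDownB data.length i st.1 st.2) := by
    funext st i
    exact heapifyDownA_eq_siftDownB (data.length - i) data.length i st.1 st.2 le_rfl
  rw [hf]
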